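-- pv_equiv track=rewrite | github.com/JonghyunLEE12/SWEA | 0220/sudoku/sol1974.py | sero
-- ===== SOURCE A (Python) =====
-- def sero(arr):
--     L = len(arr)
--     for col in range(L):
--         num_list = []
--         for row in range(L):
--             if arr[row][col] not in num_list:
--                 num_list.append(arr[row][col])
--             else:
--                 return False
--     return True
-- ===== SOURCE B (Python) =====
-- def sero(arr):
--     L = len(arr)
--     counts = {}
--     for row in arr:
--         for c, x in enumerate(row[:L]):
--             counts[(c, x)] = counts.get((c, x), 0) + 1
--     return all(v == 1 for v in counts.values())
-- ===== Notes on version B (the rewrite author's own statement) =====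
-- stated objective: alternative
-- what changed: B makes one row-major pass over the rows building a frequency table keyed by (column index, value) from each row's first len(arr) entries and then checks in bulk that every count is 1, replacing A's per-column scans with an incremental membership list and early return.
import Mathlib
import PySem

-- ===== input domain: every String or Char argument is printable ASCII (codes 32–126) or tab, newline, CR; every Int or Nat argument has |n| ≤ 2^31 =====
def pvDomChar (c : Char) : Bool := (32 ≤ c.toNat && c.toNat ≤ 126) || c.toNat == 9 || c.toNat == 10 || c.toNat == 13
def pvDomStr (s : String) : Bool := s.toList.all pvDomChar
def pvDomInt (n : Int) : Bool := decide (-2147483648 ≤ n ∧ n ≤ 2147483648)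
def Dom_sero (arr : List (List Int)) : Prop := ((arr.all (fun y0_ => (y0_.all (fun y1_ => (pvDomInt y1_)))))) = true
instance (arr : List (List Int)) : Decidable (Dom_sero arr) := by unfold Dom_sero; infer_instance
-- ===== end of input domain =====

-- B replaces A's per-column scans with an incremental membership list and early return by one
-- row-major pass building a frequency table keyed by (column index, value) from each row's first
-- len(arr) entries, followed by a bulk all-counts-are-one check (objective: alternative).

-- ===== PORT A =====
-- arr[row][col]; total form of the indexing, exact under Pre_sero (A never reads a missing cell there
-- before its return value is determined)
def seroGet (arr : List (List Int)) (row col : Int) : Int :=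
  PySem.List.pyGetD (PySem.List.pyGetD arr row []) col 0

-- inner 'for row in range(L)' loop of A, with num_list as accumulator; false = early 'return False'
def seroRowLoop (arr : List (List Int)) (col : Int) : List Int → List Int → Bool
  | [], _ => true
  | r :: rs, numList =>
      if !(numList.contains (seroGet arr r col)) then
        seroRowLoop arr col rs (numList ++ [seroGet arr r col])
      else
        false

-- outer 'for col in range(L)' loop of A
def seroColLoop (arr : List (List Int)) : List Int → Bool
  | [] => true
  | c :: cs =>
      if seroRowLoop arr c (PySem.List.pyRange 0 arr.length 1) [] then seroColLoop arr cs
      else false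

def sero (arr : List (List Int)) : Bool :=
  seroColLoop arr (PySem.List.pyRange 0 arr.length 1)

-- ===== PORT B =====
-- one counting step: counts[key] = counts.get(key, 0) + 1
def seroStep (d : PySem.Dict (Int × Int) Int) (key : Int × Int) : PySem.Dict (Int × Int) Int :=
  d.insert key (d.getD key 0 + 1)

def sero_alt (arr : List (List Int)) : Bool :=
  let counts :=
    arr.foldl (fun d row =>
      (PySem.List.enumerate (PySem.List.slice row none (some (arr.length : Int))) 0).foldl
        (fun d cx => seroStep d cx) d) PySem.Dict.empty
  counts.values.all (fun v => v == 1)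

-- ===== PRECONDITION & SPEC =====
-- the length of the shortest row (array length when arr is empty); used by Pre_sero
def seroMinLen (arr : List (List Int)) : Nat :=
  ((arr.map List.length).min?).getD arr.length

-- Pre_ admits exactly the inputs on which Python A returns normally: arrays whose rows all have at
-- least len(arr) entries, plus ragged arrays where a duplicate sits in a column A scans completely
-- (a column before the shortest row's length, or the prefix of that column above the first short
-- row), so A returns False before its column-major scan reaches a missing cell; on every other
-- ragged input A raises IndexError.
def Pre_sero (arr : List (List Int)) : Prop :=
  (∀ row ∈ arr, arr.length ≤ row.length) ∨
  (seroMinLen arr < arr.length ∧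
    ((∃ c < seroMinLen arr, ¬(arr.map (fun row => row.getD c 0)).Nodup) ∨
     ¬(((arr.takeWhile (fun row => decide (seroMinLen arr < row.length))).map
         (fun row => row.getD (seroMinLen arr) 0)).Nodup)))
instance (arr : List (List Int)) : Decidable (Pre_sero arr) := by unfold Pre_sero; infer_instance

def pvWitness_sero : List (List Int) := [[1, 2], [2, 1]]

def Spec_sero (arr : List (List Int)) (out : Bool) : Prop := out = sero_alt arr
instance (arr : List (List Int)) (out : Bool) : Decidable (Spec_sero arr out) := by unfold Spec_sero; infer_instance

-- ===== CLAIM (what is proved, stated in full; the proofs are below) =====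
def Claim_equal_sero : Prop := ∀ (arr : List (List Int)), Dom_sero arr → Pre_sero arr → Spec_sero arr (sero arr)

-- ===== LEMMAS AND PROOFS =====

-- the column at index c, as A reads it (totalised indexing)
def seroCol (arr : List (List Int)) (c : Int) : List Int :=
  (PySem.List.pyRange 0 arr.length 1).map (fun r => seroGet arr r c)

-- one row's contribution to B's table: its first L cells tagged with their column index
def seroBlk (L : Nat) (row : List Int) : List (Int × Int) :=
  PySem.List.enumerate (row.take L) 0

-- all cells B counts, in B's row-major order
def seroCellsB (arr : List (List Int)) : List (Int × Int) :=
  arr.flatMap (seroBlk arr.length)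

-- ---- A side ----
lemma seroRowLoop_eq_true_iff (arr : List (List Int)) (col : Int) :
    ∀ (rows acc : List Int), acc.Nodup →
      (seroRowLoop arr col rows acc = true ↔ (acc ++ rows.map (fun r => seroGet arr r col)).Nodup) := by
  intro rows
  induction rows with
  | nil => intro acc h; simpa [seroRowLoop] using h
  | cons r rs ih =>
      intro acc h
      by_cases hv : seroGet arr r col ∈ acc
      · have hc : acc.contains (seroGet arr r col) = true := by simpa using hv
        simp only [seroRowLoop, hc, Bool.not_true, Bool.false_eq_true, if_false]
        constructor
        · intro hfalse; exact absurd hfalse (by simp)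
        · intro hnd
          exfalso
          rw [List.nodup_append] at hnd
          exact hnd.2.2 _ hv _ (by simp) rfl
      · have hc : acc.contains (seroGet arr r col) = false := by simpa using hv
        have hacc : (acc ++ [seroGet arr r col]).Nodup := by
          rw [List.nodup_append]
          exact ⟨h, List.nodup_singleton _, by
            intro a ha b hb
            simp only [List.mem_singleton] at hb
            subst hb
            exact fun hEq => hv (hEq ▸ ha)⟩
        simp only [seroRowLoop, hc, Bool.not_false, if_true]
        rw [ih _ hacc]
        simp [List.append_assoc]

lemma seroColLoop_eq_true_iff (arr : List (List Int)) :
    ∀ cs : List Int, (seroColLoop arr cs = true ↔ ∀ c ∈ cs, (seroCol arr c).Nodup) := by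
  intro cs
  induction cs with
  | nil => simp [seroColLoop]
  | cons c cs ih =>
      have h := seroRowLoop_eq_true_iff arr c (PySem.List.pyRange 0 arr.length 1) [] List.nodup_nil
      simp only [List.nil_append] at h
      by_cases hc : (seroCol arr c).Nodup
      · have h1 : seroRowLoop arr c (PySem.List.pyRange 0 arr.length 1) [] = true := h.mpr hc
        simp [seroColLoop, h1, ih, hc]
      · have h1 : seroRowLoop arr c (PySem.List.pyRange 0 arr.length 1) [] = false := by
          cases hb : seroRowLoop arr c (PySem.List.pyRange 0 arr.length 1) [] with
          | false => rfl
          | true => exact absurd (h.mp hb) hc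
        simp only [seroColLoop, h1, Bool.false_eq_true, if_false]
        constructor
        · intro hf; exact absurd hf (by simp)
        · intro hall; exact absurd (hall c (by simp)) hc

-- A's totalised column is the getD-padded column
lemma seroCol_eq_map (arr : List (List Int)) (j : Nat) :
    seroCol arr (j : Int) = arr.map (fun row => row.getD j 0) := by
  unfold seroCol seroGet
  have h := PySem.List.map_pyGetD_pyRange_zero arr ([] : List Int)
  have hlen : PySem.List.len arr = (arr.length : Int) := rfl
  rw [hlen] at h
  calc (PySem.List.pyRange 0 arr.length 1).map
        (fun r => PySem.List.pyGetD (PySem.List.pyGetD arr r []) (j : Int) 0)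
      = ((PySem.List.pyRange 0 arr.length 1).map (fun r => PySem.List.pyGetD arr r [])).map
          (fun row => PySem.List.pyGetD row (j : Int) 0) := by rw [List.map_map]; rfl
    _ = arr.map (fun row => PySem.List.pyGetD row (j : Int) 0) := by rw [h]
    _ = arr.map (fun row => row.getD j 0) := by
          apply List.map_congr_left; intro row _; exact PySem.List.pyGetD_natCast row j 0

lemma sero_eq_true_iff (arr : List (List Int)) :
    sero arr = true ↔ ∀ j : Nat, j < arr.length → (arr.map (fun row => row.getD j 0)).Nodup := by
  unfold sero
  rw [seroColLoop_eq_true_iff]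
  constructor
  · intro h j hj
    have hm : (j : Int) ∈ PySem.List.pyRange 0 arr.length 1 := by
      rw [PySem.List.mem_pyRange_one]; constructor <;> [positivity; exact_mod_cast hj]
    have := h _ hm
    rwa [seroCol_eq_map] at this
  · intro h c hc
    rw [PySem.List.mem_pyRange_one] at hc
    have hc' : c = ((c.toNat : Nat) : Int) := by omega
    rw [hc', seroCol_eq_map]
    exact h c.toNat (by omega)

-- ---- B side ----
-- nested fold over rows and their tagged cells is the fold over the flattened cell list
lemma foldl_flatMap_step {α : Type} (g : α → List (Int × Int)) :
    ∀ (rs : List α) (d : PySem.Dict (Int × Int) Int),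
      rs.foldl (fun d r => (g r).foldl seroStep d) d = (rs.flatMap g).foldl seroStep d := by
  intro rs
  induction rs with
  | nil => intro d; rfl
  | cons r rs ih => intro d; simp [List.flatMap_cons, List.foldl_append, ih]

lemma nodup_blk (L : Nat) (row : List Int) : (seroBlk L row).Nodup := by
  apply List.Nodup.of_map (fun x : Int × Int => x.1)
  rw [seroBlk, PySem.List.map_fst_enumerate]
  exact PySem.List.nodup_pyRange_one _ _

lemma mem_blk_iff (L : Nat) (row : List Int) (c v : Int) :
    (c, v) ∈ seroBlk L row ↔
      ∃ j : Nat, c = (j : Int) ∧ j < L ∧ j < row.length ∧ row.getD j 0 = v := by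
  unfold seroBlk
  rw [List.mem_iff_getElem?]
  constructor
  · rintro ⟨k, hk⟩
    rw [PySem.List.getElem?_enumerate] at hk
    cases ht : (row.take L)[k]? with
    | none => rw [ht] at hk; exact absurd hk (by simp)
    | some x =>
        rw [ht] at hk
        simp only [Option.map_some, Option.some.injEq, Prod.mk.injEq] at hk
        obtain ⟨hc, hv⟩ := hk
        rw [List.getElem?_take] at ht
        by_cases hkL : k < L
        · rw [if_pos hkL] at ht
          rcases List.getElem?_eq_some_iff.mp ht with ⟨hklen, hx⟩
          exact ⟨k, by omega, hkL, hklen, by rw [List.getD_eq_getElem row 0 hklen, hx, hv]⟩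
        · rw [if_neg hkL] at ht; exact absurd ht (by simp)
  · rintro ⟨j, rfl, hjL, hjlen, hv⟩
    refine ⟨j, ?_⟩
    rw [PySem.List.getElem?_enumerate, List.getElem?_take, if_pos hjL,
      List.getElem?_eq_some_iff.mpr ⟨hjlen, (List.getD_eq_getElem row 0 hjlen).symm.trans hv⟩]
    simp

lemma count_cellsB (arr : List (List Int)) (k : Int × Int) :
    (seroCellsB arr).count k = arr.countP (fun row => decide (k ∈ seroBlk arr.length row)) := by
  unfold seroCellsB
  rw [List.count_flatMap]
  have h1 : arr.map (List.count k ∘ seroBlk arr.length)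
      = arr.map (fun row => if decide (k ∈ seroBlk arr.length row) then 1 else 0) := by
    apply List.map_congr_left
    intro row _
    simp [Function.comp, List.Nodup.count (nodup_blk arr.length row)]
  rw [h1, PySem.List.sum_map_ite_one_zero_nat]

lemma mem_cellsB_iff (arr : List (List Int)) (k : Int × Int) :
    k ∈ seroCellsB arr ↔ ∃ row ∈ arr, k ∈ seroBlk arr.length row := by
  unfold seroCellsB; exact List.mem_flatMap

-- B's result via the counter of the flattened cell list
lemma sero_alt_eq_true_iff (arr : List (List Int)) :
    sero_alt arr = true ↔ ∀ k ∈ seroCellsB arr, (seroCellsB arr).count k = 1 := by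
  unfold sero_alt
  have hslice : ∀ row : List Int,
      PySem.List.enumerate (PySem.List.slice row none (some (arr.length : Int))) 0
        = seroBlk arr.length row := by
    intro row; rw [PySem.List.slice_to_natCast]; rfl
  rw [show (fun (d : PySem.Dict (Int × Int) Int) (row : List Int) =>
        (PySem.List.enumerate (PySem.List.slice row none (some (arr.length : Int))) 0).foldl
          (fun d cx => seroStep d cx) d)
      = fun d row => (seroBlk arr.length row).foldl seroStep d from by
    funext d row; rw [hslice]]
  rw [foldl_flatMap_step]
  have hcounter : (seroCellsB arr).foldl seroStep PySem.Dict.empty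
      = PySem.Dict.counter (seroCellsB arr) := by
    unfold seroStep
    exact PySem.Dict.foldl_insert_getD_add_one_eq_counter (seroCellsB arr)
  show ((seroCellsB arr).foldl seroStep PySem.Dict.empty).values.all (fun v => v == 1) = true ↔ _
  rw [hcounter]
  have hvals : (PySem.Dict.counter (seroCellsB arr)).values
      = ((PySem.Set.ofList (seroCellsB arr)).map (fun k => ((seroCellsB arr).count k : Int))) := by
    show (PySem.Dict.counter (seroCellsB arr)).items.map (·.2) = _
    rw [PySem.Dict.items_counter]
    simp
  rw [hvals]
  simp only [List.all_map, List.all_eq_true]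
  constructor
  · intro h k hk
    have hmem : k ∈ PySem.Set.ofList (seroCellsB arr) := (PySem.Set.mem_ofList _ _).mpr hk
    have h1 : (((seroCellsB arr).count k : Int) == 1) = true := h _ hmem
    have h2 : ((seroCellsB arr).count k : Int) = 1 := by simpa using h1
    exact_mod_cast h2
  · intro h k hk
    have hmem : k ∈ seroCellsB arr := (PySem.Set.mem_ofList _ _).mp hk
    have := h k hmem
    simp [this]

-- for a column index every relevant row actually has, the tagged-cell count is the column count
lemma blk_mem_iff_of_lt (L : Nat) (row : List Int) (j : Nat) (v : Int)
    (hjL : j < L) (hjr : j < row.length) :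
    ((j : Int), v) ∈ seroBlk L row ↔ row.getD j 0 = v := by
  rw [mem_blk_iff]
  constructor
  · rintro ⟨j', hj', _, _, hv⟩
    have : j' = j := by exact_mod_cast hj'.symm
    exact this ▸ hv
  · intro hv; exact ⟨j, rfl, hjL, hjr, hv⟩

lemma count_cellsB_col (arr : List (List Int)) (j : Nat) (v : Int)
    (hjL : j < arr.length) (hall : ∀ row ∈ arr, j < row.length) :
    (seroCellsB arr).count ((j : Int), v) = (arr.map (fun row => row.getD j 0)).count v := by
  rw [count_cellsB]
  have h1 : (arr.map (fun row => row.getD j 0)).count v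
      = arr.countP (fun row => row.getD j 0 == v) := by
    rw [List.count, List.countP_map]; rfl
  rw [h1]
  apply List.countP_congr
  intro row hr
  simp only [decide_eq_true_eq, beq_iff_eq]
  exact blk_mem_iff_of_lt arr.length row j v hjL (hall row hr)

-- ---- the two Pre_ branches ----
lemma sero_eq_alt_of_square (arr : List (List Int))
    (h1 : ∀ row ∈ arr, arr.length ≤ row.length) : sero arr = sero_alt arr := by
  have hiff : sero arr = true ↔ sero_alt arr = true := by
    rw [sero_eq_true_iff, sero_alt_eq_true_iff]
    constructor
    · intro h k hk
      obtain ⟨c, v⟩ := k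
      rcases (mem_cellsB_iff arr (c, v)).mp hk with ⟨row, hr, hblk⟩
      rcases (mem_blk_iff _ _ _ _).mp hblk with ⟨j, rfl, hjL, hjlen, hv⟩
      rw [count_cellsB_col arr j v hjL (fun row hr => lt_of_lt_of_le hjL (h1 row hr))]
      refine (List.nodup_iff_count_eq_one.mp (h j hjL)) v ?_
      exact List.mem_map.mpr ⟨row, hr, hv⟩
    · intro h j hj
      rw [List.nodup_iff_count_eq_one]
      intro v hv
      rcases List.mem_map.mp hv with ⟨row, hr, hval⟩
      have hblk : ((j : Int), v) ∈ seroBlk arr.length row :=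
        (blk_mem_iff_of_lt arr.length row j v hj (lt_of_lt_of_le hj (h1 row hr))).mpr hval
      have hk : ((j : Int), v) ∈ seroCellsB arr := (mem_cellsB_iff arr _).mpr ⟨row, hr, hblk⟩
      have := h _ hk
      rwa [count_cellsB_col arr j v hj (fun row hr => lt_of_lt_of_le hj (h1 row hr))] at this
  cases hb : sero_alt arr with
  | true => exact hiff.mpr hb
  | false =>
      cases ha : sero arr with
      | false => rfl
      | true => exact absurd (hiff.mp ha) (by simp [hb])

lemma sero_both_false_of_ragged (arr : List (List Int))
    (hm : seroMinLen arr < arr.length)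
    (hdup : (∃ c < seroMinLen arr, ¬(arr.map (fun row => row.getD c 0)).Nodup) ∨
      ¬(((arr.takeWhile (fun row => decide (seroMinLen arr < row.length))).map
          (fun row => row.getD (seroMinLen arr) 0)).Nodup)) :
    sero arr = false ∧ sero_alt arr = false := by
  have hne : arr ≠ [] := by
    intro h; subst h; simp [seroMinLen] at hm
  have hmin? : (arr.map List.length).min? = some (seroMinLen arr) := by
    cases h : (arr.map List.length).min? with
    | none =>
        exfalso
        exact hne (by simpa using List.min?_eq_none_iff.mp h)
    | some m0 => simp [seroMinLen, h]
  have hle : ∀ row ∈ arr, seroMinLen arr ≤ row.length := by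
    intro row hr
    exact (List.min?_eq_some_iff.mp hmin?).2 row.length (List.mem_map_of_mem hr)
  -- in both subcases there is a column index jd < arr.length whose padded column has a duplicate,
  -- and a duplicated value vd whose tagged cell is counted at least twice by B
  obtain ⟨jd, hjdL, hjdDup, vd, hvd2⟩ :
      ∃ jd, jd < arr.length ∧ ¬(arr.map (fun row => row.getD jd 0)).Nodup ∧
        ∃ vd, 2 ≤ (seroCellsB arr).count ((jd : Int), vd) := by
    rcases hdup with ⟨c, hc, hdupc⟩ | hdupt
    · refine ⟨c, by omega, hdupc, ?_⟩
      rcases List.exists_duplicate_iff_not_nodup.mpr hdupc with ⟨vd, hvdup⟩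
      refine ⟨vd, ?_⟩
      rw [count_cellsB_col arr c vd (by omega)
        (fun row hr => lt_of_lt_of_le hc (hle row hr))]
      exact List.duplicate_iff_two_le_count.mp hvdup
    · set m := seroMinLen arr with hmdef
      set t := arr.takeWhile (fun row => decide (m < row.length)) with htdef
      have htsub : t.Sublist arr := (List.takeWhile_prefix _).sublist
      refine ⟨m, hm, ?_, ?_⟩
      · intro hnd
        exact hdupt (List.Nodup.sublist (List.Sublist.map _ htsub) hnd)
      · rcases List.exists_duplicate_iff_not_nodup.mpr hdupt with ⟨vd, hvdup⟩
        refine ⟨vd, ?_⟩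
        have h2 : 2 ≤ (t.map (fun row => row.getD m 0)).count vd :=
          List.duplicate_iff_two_le_count.mp hvdup
        have h3 : (t.map (fun row => row.getD m 0)).count vd
            = t.countP (fun row => decide (((m : Int), vd) ∈ seroBlk arr.length row)) := by
          rw [List.count, List.countP_map]
          apply List.countP_congr
          intro row hr
          have hrm : m < row.length := by
            have := List.mem_takeWhile_imp hr
            simpa using this
          simp only [Function.comp, beq_iff_eq, decide_eq_true_eq]
          exact (blk_mem_iff_of_lt arr.length row m vd hm hrm).symm
        rw [count_cellsB]
        calc 2 ≤ t.countP (fun row => decide (((m : Int), vd) ∈ seroBlk arr.length row)) := by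
              rw [← h3]; exact h2
          _ ≤ arr.countP (fun row => decide (((m : Int), vd) ∈ seroBlk arr.length row)) :=
              List.Sublist.countP_le htsub
  constructor
  · cases ha : sero arr with
    | false => rfl
    | true =>
        exfalso
        exact hjdDup ((sero_eq_true_iff arr).mp ha jd hjdL)
  · cases hb : sero_alt arr with
    | false => rfl
    | true =>
        exfalso
        have hmem : ((jd : Int), vd) ∈ seroCellsB arr :=
          List.count_pos_iff.mp (by omega)
        have := (sero_alt_eq_true_iff arr).mp hb _ hmem
        omega

-- ===== VERDICT (by name: the statement is the Claim_ definition above) =====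
theorem sero_spec : Claim_equal_sero := by
  intro arr _ hpre
  unfold Spec_sero
  rcases hpre with h1 | ⟨hm, hdup⟩
  · exact sero_eq_alt_of_square arr h1
  · obtain ⟨ha, hb⟩ := sero_both_false_of_ragged arr hm hdup
    rw [ha, hb]
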